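-- pv_equiv track=rewrite | github.com/haukesteffen/TabularShenanigans | src/tabular_shenanigans/train.py | _resolve_run_ledger_output_columns
-- ===== SOURCE A (Python) =====
-- RUN_LEDGER_COLUMNS = [
--     "run_id",
--     "timestamp_utc",
--     "competition_slug",
--     "task_type",
--     "primary_metric",
--     "best_model_id",
--     "best_model_name",
--     "cv_mean",
--     "cv_std",
--     "higher_is_better",
--     "model_count",
--     "cv_n_splits",
--     "cv_shuffle",
--     "cv_random_state",
--     "config_fingerprint",
--     "target_mean",
--     "target_std",
--     "target_min",
--     "target_max",
--     "positive_count",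
--     "negative_count",
--     "target_prevalence",
--     "positive_label",
--     "observed_label_1",
--     "observed_label_2",
--     "negative_label",
-- ]
--
-- def _resolve_run_ledger_output_columns(
--     existing_columns: list[str],
--     row_columns: list[str],
-- ) -> list[str]:
--     extra_columns: list[str] = []
--     seen_extra_columns: set[str] = set()
--     for columns in (existing_columns, row_columns):
--         for column in columns:
--             if column in RUN_LEDGER_COLUMNS or column in seen_extra_columns:
--                 continue
--             seen_extra_columns.add(column)
--             extra_columns.append(column)
--     return [*RUN_LEDGER_COLUMNS, *extra_columns]
-- ===== SOURCE B (Python) =====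
-- RUN_LEDGER_COLUMNS = [
--     "run_id",
--     "timestamp_utc",
--     "competition_slug",
--     "task_type",
--     "primary_metric",
--     "best_model_id",
--     "best_model_name",
--     "cv_mean",
--     "cv_std",
--     "higher_is_better",
--     "model_count",
--     "cv_n_splits",
--     "cv_shuffle",
--     "cv_random_state",
--     "config_fingerprint",
--     "target_mean",
--     "target_std",
--     "target_min",
--     "target_max",
--     "positive_count",
--     "negative_count",
--     "target_prevalence",
--     "positive_label",
--     "observed_label_1",
--     "observed_label_2",
--     "negative_label",
-- ]
--
--
-- def _resolve_run_ledger_output_columns(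
--     existing_columns: list[str],
--     row_columns: list[str],
-- ) -> list[str]:
--     # Consume the combined column list back-to-front: pop the last column and
--     # keep it only if it is not a ledger column and does not occur earlier
--     # (so the first occurrence wins); extras come out reversed, flip at the end.
--     combined = existing_columns + row_columns
--     extras_rev: list[str] = []
--     while combined:
--         last = combined.pop()
--         if last not in RUN_LEDGER_COLUMNS and last not in combined:
--             extras_rev.append(last)
--     extras_rev.reverse()
--     return RUN_LEDGER_COLUMNS + extras_rev
-- ===== Notes on version B (the rewrite author's own statement) =====
-- stated objective: alternative
-- what changed: Replaced A's forward interleaved loop with an auxiliary seen-set by a back-to-front consuming loop: pop the last column, keep it only if it is neither a ledger column nor present in the remaining prefix (first occurrence wins), then reverse the collected extras; no seen-set is maintained.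
import Mathlib
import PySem

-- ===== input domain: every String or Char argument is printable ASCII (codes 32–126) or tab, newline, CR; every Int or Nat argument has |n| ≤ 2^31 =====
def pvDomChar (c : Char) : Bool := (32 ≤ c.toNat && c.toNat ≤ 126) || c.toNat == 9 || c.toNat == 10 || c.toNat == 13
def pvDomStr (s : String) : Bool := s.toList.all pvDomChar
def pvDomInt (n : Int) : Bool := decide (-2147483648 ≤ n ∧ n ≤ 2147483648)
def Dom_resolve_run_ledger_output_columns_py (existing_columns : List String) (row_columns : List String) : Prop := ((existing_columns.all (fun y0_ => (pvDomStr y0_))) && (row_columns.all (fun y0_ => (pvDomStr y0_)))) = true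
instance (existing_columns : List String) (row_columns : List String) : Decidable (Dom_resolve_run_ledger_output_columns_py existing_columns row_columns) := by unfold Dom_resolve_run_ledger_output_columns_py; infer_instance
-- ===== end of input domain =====

-- B consumes the combined list back-to-front (pop + membership in the remaining prefix, no seen-set), reversing the collected extras at the end; alternative decomposition, not claimed faster.


-- ===== PORT A =====
def RUN_LEDGER_COLUMNS : List String := [
  "run_id", "timestamp_utc", "competition_slug", "task_type", "primary_metric",
  "best_model_id", "best_model_name", "cv_mean", "cv_std", "higher_is_better",
  "model_count", "cv_n_splits", "cv_shuffle", "cv_random_state", "config_fingerprint",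
  "target_mean", "target_std", "target_min", "target_max", "positive_count",
  "negative_count", "target_prevalence", "positive_label", "observed_label_1",
  "observed_label_2", "negative_label"]

-- Literal port of A: one interleaved forward loop over both lists, skipping ledger columns and
-- columns already in the seen-set, appending the rest.
def resolve_run_ledger_output_columns_py (existing_columns : List String) (row_columns : List String) : List String :=
  let st :=
    [existing_columns, row_columns].foldl
      (fun st columns =>
        columns.foldl
          (fun (st : List String × PySem.Set String) column =>
            if RUN_LEDGER_COLUMNS.contains column || PySem.Set.contains st.2 column then st
            else (st.1 ++ [column], PySem.Set.add st.2 column))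
          st)
      ([], PySem.Set.empty)
  RUN_LEDGER_COLUMNS ++ st.1


-- ===== PORT B =====
-- Port of B's while loop: pop the last element of `combined`; keep it unless it is a
-- ledger column or occurs in the remaining prefix; extras accumulate back-to-front.
def pvPopLoop (combined : List String) (extras_rev : List String) : List String :=
  if h : combined = [] then extras_rev
  else
    let last := combined.getLast h
    let combined' := combined.dropLast
    if RUN_LEDGER_COLUMNS.contains last || combined'.contains last then
      pvPopLoop combined' extras_rev
    else
      pvPopLoop combined' (extras_rev ++ [last])
termination_by combined.length
decreasing_by all_goals
  · have : combined.length ≠ 0 := by simpa [List.length_eq_zero_iff] using h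
    simp [List.length_dropLast]; omega

def resolve_run_ledger_output_columns_py_alt (existing_columns : List String) (row_columns : List String) : List String :=
  let combined := existing_columns ++ row_columns
  let extras_rev := pvPopLoop combined []
  RUN_LEDGER_COLUMNS ++ extras_rev.reverse


-- ===== PRECONDITION & SPEC =====
def Spec_resolve_run_ledger_output_columns_py (existing_columns : List String) (row_columns : List String) (out : List String) : Prop := out = resolve_run_ledger_output_columns_py_alt existing_columns row_columns
instance (existing_columns : List String) (row_columns : List String) (out : List String) : Decidable (Spec_resolve_run_ledger_output_columns_py existing_columns row_columns out) := by unfold Spec_resolve_run_ledger_output_columns_py; infer_instance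

-- ===== CLAIM =====
def Claim_equal_resolve_run_ledger_output_columns_py : Prop := ∀ (existing_columns : List String) (row_columns : List String), Dom_resolve_run_ledger_output_columns_py existing_columns row_columns → Spec_resolve_run_ledger_output_columns_py existing_columns row_columns (resolve_run_ledger_output_columns_py existing_columns row_columns)

-- ===== LEMMAS AND PROOFS =====

-- A's interleaved loop computes the ledger-filtered ordered dedup of the input it folds over.
lemma loopA_filter (L : List String) :
    ∀ (l acc seen : List String),
      (∀ c, L.contains c = false → (c ∈ seen ↔ c ∈ acc)) →
      (l.foldl
        (fun (st : List String × PySem.Set String) column =>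
          if L.contains column || PySem.Set.contains st.2 column then st
          else (st.1 ++ [column], PySem.Set.add st.2 column))
        (acc.filter (fun c => !(L.contains c)), seen)).1
      = (l.foldl PySem.Set.add acc).filter (fun c => !(L.contains c)) := by
  intro l
  induction l with
  | nil => intro acc seen _; rfl
  | cons c t ih =>
    intro acc seen hinv
    simp only [List.foldl_cons]
    by_cases h1 : L.contains c = true
    · have hcL : c ∈ L := by simpa using h1
      have hcond : (L.contains c || PySem.Set.contains seen c) = true := by simp; exact Or.inl hcL
      rw [if_pos hcond]
      have hacc : (PySem.Set.add acc c).filter (fun c => !(L.contains c)) =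
          acc.filter (fun c => !(L.contains c)) := by
        rw [PySem.Set.add_eq_ite]
        split_ifs with hm
        · rfl
        · simp [List.filter_append, hcL]
      rw [← hacc] at *
      rw [ih (PySem.Set.add acc c) seen ?_]
      intro c' hc'
      have hne : c' ≠ c := by intro he; rw [he] at hc'; rw [h1] at hc'; cases hc'
      rw [PySem.Set.mem_add]
      constructor
      · intro h; exact Or.inl ((hinv c' hc').mp h)
      · rintro (h | h)
        · exact (hinv c' hc').mpr h
        · exact absurd h hne
    · replace h1 : L.contains c = false := by simpa using h1
      have hcL : c ∉ L := by simpa using h1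
      by_cases h2 : c ∈ seen
      · have hcond : (L.contains c || PySem.Set.contains seen c) = true := by
          simp [PySem.Set.contains]; exact Or.inr h2
        rw [if_pos hcond]
        have hmacc : c ∈ acc := (hinv c h1).mp h2
        rw [PySem.Set.add_of_mem hmacc] at *
        exact ih acc seen hinv
      · have hcond : (L.contains c || PySem.Set.contains seen c) = false := by
          simp [PySem.Set.contains, hcL, h2]
        rw [hcond]
        simp only [Bool.false_eq_true, if_false]
        have hmacc : c ∉ acc := fun h => h2 ((hinv c h1).mpr h)
        rw [PySem.Set.add_of_not_mem hmacc]
        have hext : acc.filter (fun c => !(L.contains c)) ++ [c]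
            = (acc ++ [c]).filter (fun c => !(L.contains c)) := by
          simp [List.filter_append, hcL]
        rw [hext]
        rw [ih (acc ++ [c]) (PySem.Set.add seen c) ?_]
        intro c' hc'
        rw [PySem.Set.mem_add, List.mem_append, List.mem_singleton]
        exact or_congr (hinv c' hc') Iff.rfl

-- B's pop loop returns the accumulator followed by the REVERSE of the
-- ledger-filtered ordered dedup of `combined`.
lemma pvPopLoop_spec (l : List String) :
    ∀ acc, pvPopLoop l acc
      = acc ++ ((PySem.List.dedup l).filter (fun c => !(RUN_LEDGER_COLUMNS.contains c))).reverse := by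
  induction l using List.reverseRecOn with
  | nil => intro acc; rw [pvPopLoop]; simp [PySem.List.dedup]
  | append_singleton l c ih =>
    intro acc
    rw [pvPopLoop]
    have hne : l ++ [c] ≠ [] := by simp
    rw [dif_neg hne]
    have hlast : (l ++ [c]).getLast hne = c := by simp
    have hdrop : (l ++ [c]).dropLast = l := by simp
    simp only [hlast, hdrop]
    have hded : PySem.List.dedup (l ++ [c])
        = PySem.Set.add (PySem.List.dedup l) c := by
      simp only [PySem.List.dedup_eq_ofList, PySem.Set.ofList_append_singleton]
    by_cases hL : RUN_LEDGER_COLUMNS.contains c = true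
    · have hcL : c ∈ RUN_LEDGER_COLUMNS := by simpa using hL
      rw [if_pos (by simp; exact Or.inl hcL)]
      rw [ih acc, hded, PySem.Set.add_eq_ite]
      split_ifs with hm
      · rfl
      · simp [List.filter_append, hcL]
    · by_cases hmem : l.contains c = true
      · rw [if_pos (by simp; exact Or.inr (by simpa using hmem))]
        rw [ih acc, hded]
        have : c ∈ PySem.List.dedup l := by
          rw [PySem.List.mem_dedup]; simpa using hmem
        rw [PySem.Set.add_of_mem this]
      · have hcond : (RUN_LEDGER_COLUMNS.contains c || l.contains c) = false := by
          simp at hL hmem ⊢; exact ⟨hL, hmem⟩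
        rw [hcond]
        simp only [Bool.false_eq_true, if_false]
        rw [ih (acc ++ [c]), hded]
        have : c ∉ PySem.List.dedup l := by
          rw [PySem.List.mem_dedup]; simpa using hmem
        rw [PySem.Set.add_of_not_mem this]
        have hcL : c ∉ RUN_LEDGER_COLUMNS := by simpa using hL
        simp [List.filter_append, hcL]

-- ===== VERDICT =====
theorem resolve_run_ledger_output_columns_py_spec : Claim_equal_resolve_run_ledger_output_columns_py := by
  intro existing_columns row_columns _
  unfold Spec_resolve_run_ledger_output_columns_py
  unfold resolve_run_ledger_output_columns_py resolve_run_ledger_output_columns_py_alt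
  simp only [List.foldl_cons, List.foldl_nil, ← List.foldl_append]
  have h := loopA_filter RUN_LEDGER_COLUMNS (existing_columns ++ row_columns) [] PySem.Set.empty
      (by intro c _; simp [PySem.Set.empty])
  simp only [List.filter_nil] at h
  rw [h]
  rw [pvPopLoop_spec (existing_columns ++ row_columns) []]
  simp [PySem.List.dedup_eq_ofList, PySem.Set.ofList_eq_foldl]
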